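-- pv_equiv track=rewrite | github.com/ishita-sh18/HackerRank | Problem Solving/Funny String.py | funnyString
-- ===== SOURCE A (Python) =====
-- def funnyString(s):
--     # Write your code here
--     a=s[::-1]
--     list1=[]
--     list2=[]
--     for i in range(len(a)-1):
--         list1.append(abs(ord(s[i])-ord(s[i+1])))
--     for j in range(len(a)-1):
--         list2.append(abs(ord(a[j])-ord(a[j+1])))
--     if list1==list2:
--         return("Funny")
--     else:
--         return("Not Funny")
-- ===== SOURCE B (Python) =====
-- def funnyString(s):
--     # one pass to build the adjacent-difference list, then a converging
--     # two-pointer palindrome check with early exit (no reversed copies)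
--     d = [abs(ord(x) - ord(y)) for x, y in zip(s, s[1:])]
--     i, j = 0, len(d) - 1
--     while i < j:
--         if d[i] != d[j]:
--             return "Not Funny"
--         i += 1
--         j -= 1
--     return "Funny"
-- ===== Notes on version B (the rewrite author's own statement) =====
-- stated objective: simpler
-- what changed: B builds one adjacent-difference list via zip and checks it is a palindrome with two converging indices and early exit, instead of A's reversed copy of the string, two separately built difference lists and a full list comparison.
import Mathlib
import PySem

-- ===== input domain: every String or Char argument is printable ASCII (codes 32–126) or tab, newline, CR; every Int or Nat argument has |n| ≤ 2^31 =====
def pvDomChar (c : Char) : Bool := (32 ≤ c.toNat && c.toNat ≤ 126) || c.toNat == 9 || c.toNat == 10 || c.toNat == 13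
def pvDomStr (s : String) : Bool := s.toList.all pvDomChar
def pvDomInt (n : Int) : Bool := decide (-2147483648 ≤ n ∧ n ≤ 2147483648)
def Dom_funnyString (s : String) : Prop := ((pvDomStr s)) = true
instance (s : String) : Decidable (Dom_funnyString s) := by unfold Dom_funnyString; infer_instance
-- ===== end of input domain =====

-- B builds one adjacent-difference list via zip and checks it is a palindrome with two
-- converging indices and early exit, instead of A's reversed string copy, two separately
-- built difference lists and a full list comparison (objective: simpler).

-- ===== PORT A =====
-- A's loop 'for i in range(len(a)-1): listX.append(abs(ord(src[i])-ord(src[i+1])))';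
-- every index i, i+1 the loop produces is in range, so pyGetD's default is never used
def pvBuildDiffs (src : List Char) (n : Int) : List Int :=
  (PySem.List.pyRange 0 n 1).foldl
    (fun acc i =>
      acc ++ [|((PySem.List.pyGetD src i ' ').toNat : Int)
               - ((PySem.List.pyGetD src (i + 1) ' ').toNat : Int)|]) []

def funnyString (s : String) : String :=
  let t := s.toList
  let a := t.reverse                          -- a = s[::-1]
  let list1 := pvBuildDiffs t ((a.length : Int) - 1)
  let list2 := pvBuildDiffs a ((a.length : Int) - 1)
  if list1 = list2 then "Funny" else "Not Funny"

-- ===== PORT B =====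
-- B's loop 'while i < j: if d[i] != d[j]: return "Not Funny"; i += 1; j -= 1'
def pvTwoPtr (d : List Int) (i j : Int) : String :=
  if h : i < j then
    if PySem.List.pyGetD d i 0 ≠ PySem.List.pyGetD d j 0 then "Not Funny"
    else pvTwoPtr d (i + 1) (j - 1)
  else "Funny"
termination_by (j - i).toNat
decreasing_by omega

def funnyString_alt (s : String) : String :=
  let cs := s.toList
  let d := (cs.zip cs.tail).map (fun p => |(p.1.toNat : Int) - (p.2.toNat : Int)|)
  pvTwoPtr d 0 ((d.length : Int) - 1)

-- ===== PRECONDITION & SPEC =====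
def Spec_funnyString (s : String) (out : String) : Prop := out = funnyString_alt s
instance (s : String) (out : String) : Decidable (Spec_funnyString s out) := by unfold Spec_funnyString; infer_instance

-- ===== CLAIM (what is proved, stated in full; the proofs are below) =====
def Claim_equal_funnyString : Prop := ∀ (s : String), Dom_funnyString s → Spec_funnyString s (funnyString s)

-- ===== LEMMAS AND PROOFS =====

-- B's difference list, as a named helper for the proofs
def pvDl (l : List Char) : List Int :=
  (l.zip l.tail).map (fun p => |(p.1.toNat : Int) - (p.2.toNat : Int)|)

theorem pvDl_length (l : List Char) : (pvDl l).length = l.length - 1 := by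
  simp [pvDl, List.length_zip]

theorem pvDl_getElem (l : List Char) (k : Nat) (hk : k + 1 < l.length) :
    (pvDl l)[k]'(by simp [pvDl_length]; omega) =
      |((l[k]'(by omega)).toNat : Int) - ((l[k+1]'hk).toNat : Int)| := by
  simp [pvDl, List.getElem_zip]

-- A's append loop builds exactly B's difference list
theorem pvBuildDiffs_eq (src : List Char) :
    pvBuildDiffs src ((src.length : Int) - 1) = pvDl src := by
  unfold pvBuildDiffs
  rw [PySem.List.foldl_append_singleton_eq_map, PySem.List.pyRange_one, List.map_map,
      List.nil_append]
  apply List.ext_getElem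
  · simp [pvDl_length]
  · intro k hk1 hk2
    have hkL : k + 1 < src.length := by
      simp at hk1 hk2; omega
    rw [pvDl_getElem src k hkL]
    simp only [List.getElem_map, List.getElem_range, Function.comp]
    have h1 : ((0 : Int) + (k : Int)) = ((k : Nat) : Int) := by omega
    rw [h1, PySem.List.pyGetD_natCast]
    have h2 : ((k : Nat) : Int) + 1 = (((k + 1 : Nat)) : Int) := by push_cast; ring
    rw [h2, PySem.List.pyGetD_natCast]
    rw [List.getD_eq_getElem _ _ (by omega), List.getD_eq_getElem _ _ (by omega)]

-- the difference list of the reversed string is the reversed difference list (abs is symmetric)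
theorem pvDl_reverse (l : List Char) : pvDl l.reverse = (pvDl l).reverse := by
  apply List.ext_getElem
  · simp [pvDl_length]
  · intro k h1 h2
    have hL : k + 1 < l.length := by simp [pvDl_length] at h1; omega
    rw [List.getElem_reverse]
    rw [pvDl_getElem l.reverse k (by simpa using hL)]
    have hm : (pvDl l).length - 1 - k + 1 < l.length := by
      simp [pvDl_length]; omega
    rw [pvDl_getElem l ((pvDl l).length - 1 - k) hm]
    rw [List.getElem_reverse, List.getElem_reverse, abs_sub_comm]
    have e1 : l.length - 1 - k = (pvDl l).length - 1 - k + 1 := by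
      simp [pvDl_length]; omega
    have e2 : l.length - 1 - (k + 1) = (pvDl l).length - 1 - k := by
      simp [pvDl_length]; omega
    simp only [e1, e2]

theorem pvTwoPtr_cases (d : List Int) (i j : Int) :
    pvTwoPtr d i j = "Funny" ∨ pvTwoPtr d i j = "Not Funny" := by
  by_cases h : i < j
  · rw [pvTwoPtr, dif_pos h]
    split
    · right; rfl
    · exact pvTwoPtr_cases d (i + 1) (j - 1)
  · rw [pvTwoPtr, dif_neg h]; left; rfl
termination_by (j - i).toNat
decreasing_by omega

-- loop invariant: with i + j = len d - 1 the two-pointer loop decides the mirror condition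
theorem pvTwoPtr_funny (d : List Int) (i j : Int) (hi : 0 ≤ i)
    (hij : i + j = (d.length : Int) - 1) :
    pvTwoPtr d i j = "Funny" ↔
      (∀ k : Nat, i ≤ (k : Int) → (k : Int) < j → d.getD k 0 = d.getD (d.length - 1 - k) 0) := by
  by_cases h : i < j
  · rw [pvTwoPtr, dif_pos h]
    have hiN : i = ((i.toNat : Nat) : Int) := by omega
    have hjlt : j < (d.length : Int) := by omega
    have hgi : PySem.List.pyGetD d i 0 = d.getD i.toNat 0 := by
      rw [hiN, PySem.List.pyGetD_natCast]; simp only [Int.toNat_natCast]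
    have hgj : PySem.List.pyGetD d j 0 = d.getD j.toNat 0 := by
      have : j = ((j.toNat : Nat) : Int) := by omega
      rw [this, PySem.List.pyGetD_natCast]; simp only [Int.toNat_natCast]
    have hjmir : j.toNat = d.length - 1 - i.toNat := by omega
    split
    · rename_i hne
      constructor
      · intro hcon; exact absurd hcon (by decide)
      · intro hall
        exfalso
        apply hne
        rw [hgi, hgj, hjmir]
        exact hall i.toNat (by omega) (by omega)
    · rename_i heq
      push Not at heq
      rw [hgi, hgj] at heq
      rw [pvTwoPtr_funny d (i+1) (j-1) (by omega) (by omega)]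
      constructor
      · intro hall k hk1 hk2
        by_cases hki : (k : Int) = i
        · have : k = i.toNat := by omega
          rw [this, ← hjmir]; exact heq
        · by_cases hkj : (k : Int) = j - 1
          · by_cases hkk : (k : Int) = i + 1
            · -- the middle element: its mirror index is k itself
              have hmir : d.length - 1 - k = k := by omega
              rw [hmir]
            · -- k = j-1 : its statement is the mirror of the one at d.length-1-k
              have := hall (d.length - 1 - k) (by omega) (by omega)
              have hmm : d.length - 1 - (d.length - 1 - k) = k := by omega
              rw [hmm] at this
              exact this.symm
          · exact hall k (by omega) (by omega)
      · intro hall k hk1 hk2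
        by_cases hki : (k : Int) = i
        · have : k = i.toNat := by omega
          rw [this, ← hjmir]; exact heq
        · exact hall k (by omega) (by omega)
  · rw [pvTwoPtr, dif_neg h]
    constructor
    · intro _ k hk1 hk2
      omega
    · intro _; rfl
termination_by (j - i).toNat
decreasing_by omega

-- a list is its own reverse iff the mirror condition on the half-open index range holds
theorem pvPalindrome_iff (d : List Int) :
    d = d.reverse ↔
      (∀ k : Nat, (0 : Int) ≤ (k : Int) → (k : Int) < (d.length : Int) - 1 →
        d.getD k 0 = d.getD (d.length - 1 - k) 0) := by
  constructor
  · intro hp k _ hk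
    have hkL : k < d.length := by omega
    conv_lhs => rw [hp]
    rw [List.getD_eq_getElem _ _ (by simpa using hkL), List.getD_eq_getElem _ _ (by omega),
        List.getElem_reverse]
  · intro hall
    apply List.ext_getElem (by simp)
    intro k h1 h2
    rw [List.getElem_reverse]
    by_cases hk : (k : Int) < (d.length : Int) - 1
    · have := hall k (by omega) hk
      rw [List.getD_eq_getElem _ _ h1, List.getD_eq_getElem _ _ (by omega)] at this
      exact this
    · have hk0 : k = d.length - 1 := by omega
      by_cases h0 : (0 : Int) < (d.length : Int) - 1
      · have h00 := hall 0 (by omega) (by omega)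
        rw [List.getD_eq_getElem _ _ (by omega), List.getD_eq_getElem _ _ (by omega)] at h00
        have e : d.length - 1 - 0 = k := by omega
        simp only [e] at h00
        have e2 : d.length - 1 - k = 0 := by omega
        simp only [e2]
        exact h00.symm
      · -- d.length ≤ 1 : the mirror index is k itself
        have e : d.length - 1 - k = k := by omega
        simp only [e]

-- ===== VERDICT (by name: the statement is the Claim_ definition above) =====
theorem funnyString_spec : Claim_equal_funnyString := by
  intro s _
  show funnyString s = funnyString_alt s
  unfold funnyString funnyString_alt
  simp only [List.length_reverse]
  have hr := pvBuildDiffs_eq s.toList.reverse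
  rw [List.length_reverse] at hr
  rw [pvBuildDiffs_eq, hr, pvDl_reverse]
  have hd : (List.map (fun p => |((p.1.toNat : Int)) - ((p.2.toNat : Int))|)
      (s.toList.zip s.toList.tail)) = pvDl s.toList := rfl
  rw [hd]
  by_cases hp : pvDl s.toList = (pvDl s.toList).reverse
  · rw [if_pos hp]
    symm
    rw [pvTwoPtr_funny _ 0 _ le_rfl (by ring)]
    exact fun k h1 h2 => (pvPalindrome_iff _).mp hp k h1 h2
  · rw [if_neg hp]
    rcases pvTwoPtr_cases (pvDl s.toList) 0 (((pvDl s.toList).length : Int) - 1) with hF | hN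
    · exact absurd ((pvPalindrome_iff _).mpr
        ((pvTwoPtr_funny _ 0 _ le_rfl (by ring)).mp hF)) hp
    · exact hN.symm
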